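-- pv_equiv track=rewrite | github.com/chelxten/mscdissertation | pages/2_tour_fix.py | no_consecutive_food_or_break
-- ===== SOURCE A (Python) =====
-- zones = {
--     "thrill": ["Roller Coaster", "Drop Tower", "Haunted Mine Train", "Spinning Vortex", "Freefall Cannon"],
--     "water": ["Water Slide", "Lazy River", "Log Flume", "Splash Battle", "Wave Pool"],
--     "family": ["Bumper Cars", "Mini Ferris Wheel", "Animal Safari Ride", "Ball Pit Dome", "Train Adventure"],
--     "entertainment": ["Live Stage", "Street Parade", "Magic Show", "Circus Tent", "Musical Fountain"],
--     "food": ["Food Court", "Snack Bar", "Ice Cream Kiosk", "Pizza Plaza", "Smoothie Station"],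
--     "shopping": ["Souvenir Shop", "Candy Store", "Photo Booth", "Gift Emporium", "Toy World"],
--     "relaxation": ["Relaxation Garden", "Shaded Benches", "Quiet Lake View", "Zen Courtyard", "Sky Deck"]
-- }
--
-- def no_consecutive_food_or_break(route, zones):
--     final = []
--     last_soft = False
--
--     for stop in route:
--         if stop.startswith("[Clothing Change]"):
--             final.append(stop)
--             last_soft = False
--             continue
--
--         zone = next((z for z, a in zones.items() if stop in a), None)
--         is_soft = zone in {"food", "relaxation"}
--
--         if is_soft and last_soft:
--             continue
--
--         final.append(stop)
--         last_soft = is_soft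
--
--     return final
-- ===== SOURCE B (Python) =====
-- def no_consecutive_food_or_break(route, zones):
--     # one-time reverse index: stop name -> first zone containing it
--     zone_of = {}
--     for z, names in zones.items():
--         for name in names:
--             zone_of.setdefault(name, z)
--
--     def soft(stop):
--         return (not stop.startswith("[Clothing Change]")) and \
--             zone_of.get(stop) in ("food", "relaxation")
--
--     # groupby-style segmentation: walk maximal runs of equal softness;
--     # keep only the first stop of a soft run, keep a non-soft run whole.
--     out = []
--     i = 0
--     n = len(route)
--     while i < n:
--         f = soft(route[i])
--         j = i + 1
--         while j < n and soft(route[j]) == f: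
--             j += 1
--         if f:
--             out.append(route[i])
--         else:
--             out.extend(route[i:j])
--         i = j
--     return out
-- ===== Notes on version B (the rewrite author's own statement) =====
-- stated objective: faster
-- what changed: Replaced A's stateful per-stop loop (last_soft flag, a linear scan of zones per stop) by a groupby-style segmentation: a one-time stop-to-zone reverse dict, then a two-pointer walk over maximal runs of equal softness that emits the first stop of each soft run and whole non-soft runs.
import Mathlib
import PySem

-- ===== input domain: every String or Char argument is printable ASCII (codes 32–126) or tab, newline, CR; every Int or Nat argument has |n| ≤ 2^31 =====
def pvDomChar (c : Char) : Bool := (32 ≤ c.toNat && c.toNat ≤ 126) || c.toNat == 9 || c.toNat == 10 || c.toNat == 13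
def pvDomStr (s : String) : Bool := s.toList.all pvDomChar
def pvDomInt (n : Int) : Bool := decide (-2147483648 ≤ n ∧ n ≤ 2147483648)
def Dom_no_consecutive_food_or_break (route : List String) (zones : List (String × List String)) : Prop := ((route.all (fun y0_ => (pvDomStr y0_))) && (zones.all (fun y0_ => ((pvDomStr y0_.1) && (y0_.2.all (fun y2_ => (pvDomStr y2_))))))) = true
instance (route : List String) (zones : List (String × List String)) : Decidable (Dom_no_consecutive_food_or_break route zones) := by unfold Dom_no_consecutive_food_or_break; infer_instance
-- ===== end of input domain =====

-- B replaces A's stateful per-stop loop (linear zone scan per stop) by a one-time stop→zone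
-- reverse dict plus a groupby-style walk over maximal runs of equal softness (faster: O(n+z) vs O(n*z)).

-- ===== PORT A =====
-- next((z for z, a in zones.items() if stop in a), None)
def aFindZone (stop : String) : List (String × List String) → Option String
  | [] => none
  | (z, a) :: rest => if stop ∈ a then some z else aFindZone stop rest

-- one iteration of A's for-loop over state (final, last_soft)
def aStep (zones : List (String × List String)) (st : List String × Bool) (stop : String) : List String × Bool :=
  if PySem.Str.startswith stop "[Clothing Change]" then (st.1 ++ [stop], false)
  else
    let zone := aFindZone stop zones
    let isSoft := zone == some "food" || zone == some "relaxation"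
    if isSoft && st.2 then st
    else (st.1 ++ [stop], isSoft)

def no_consecutive_food_or_break (route : List String) (zones : List (String × List String)) : List String :=
  (route.foldl (aStep zones) ([], false)).1

-- ===== PORT B =====
-- zone_of built with setdefault (first zone wins)
def bZoneOf (zones : List (String × List String)) : PySem.Dict String String :=
  zones.foldl (fun d p => p.2.foldl (fun d name => d.setdefault name p.1) d) PySem.Dict.empty

-- soft(stop): not a clothing change and zone_of.get(stop) in ("food", "relaxation")
def bSoft (zo : PySem.Dict String String) (stop : String) : Bool :=
  !(PySem.Str.startswith stop "[Clothing Change]") &&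
    (zo.get? stop == some "food" || zo.get? stop == some "relaxation")

-- the outer while loop over runs: the inner 'while j < n and soft(route[j]) == f: j += 1'
-- is the takeWhile/dropWhile split of the remaining list; route[i:j] = head :: run
def bLoop (f : String → Bool) : List String → List String
  | [] => []
  | s :: rest =>
    let c := f s
    let run := rest.takeWhile (fun t => f t == c)
    let rest' := rest.dropWhile (fun t => f t == c)
    (if c then [s] else s :: run) ++ bLoop f rest'
termination_by l => l.length
decreasing_by
  simpa using Nat.lt_succ_of_le (List.length_dropWhile_le _ _)

def no_consecutive_food_or_break_alt (route : List String) (zones : List (String × List String)) : List String :=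
  bLoop (bSoft (bZoneOf zones)) route

-- ===== PRECONDITION & SPEC =====
def Spec_no_consecutive_food_or_break (route : List String) (zones : List (String × List String)) (out : List String) : Prop := out = no_consecutive_food_or_break_alt route zones
instance (route : List String) (zones : List (String × List String)) (out : List String) : Decidable (Spec_no_consecutive_food_or_break route zones out) := by unfold Spec_no_consecutive_food_or_break; infer_instance

-- ===== CLAIM (what is proved, stated in full; the proofs are below) =====
def Claim_equal_no_consecutive_food_or_break : Prop := ∀ (route : List String) (zones : List (String × List String)), Dom_no_consecutive_food_or_break route zones → Spec_no_consecutive_food_or_break route zones (no_consecutive_food_or_break route zones)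

-- ===== LEMMAS AND PROOFS =====

-- A's soft classification, as a pure function
def softA (zones : List (String × List String)) (stop : String) : Bool :=
  !(PySem.Str.startswith stop "[Clothing Change]") &&
    (aFindZone stop zones == some "food" || aFindZone stop zones == some "relaxation")

-- reference shape: 'keep a stop unless it and the previous kept state are both soft'
def keepRuns (f : String → Bool) (prev : Bool) : List String → List String
  | [] => []
  | s :: rest => (if f s && prev then [] else [s]) ++ keepRuns f (f s) rest

theorem get?_setdefault_fold (z : String) (names : List String) (d : PySem.Dict String String) (s : String) :
    (names.foldl (fun d name => d.setdefault name z) d).get? s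
      = (d.get? s).or (if s ∈ names then some z else none) := by
  induction names generalizing d with
  | nil => cases h : d.get? s <;> simp [h]
  | cons n rest ih =>
    simp only [List.foldl_cons, ih]
    by_cases hn : s = n
    · subst hn
      rw [PySem.Dict.get?_setdefault_self]
      cases h : d.get? s <;> simp [Option.getD]
    · rw [PySem.Dict.get?_setdefault_of_ne]
      · simp [hn]
      · exact hn

theorem get?_bZoneOf_fold (zones : List (String × List String)) (d : PySem.Dict String String) (s : String) :
    (zones.foldl (fun d p => p.2.foldl (fun d name => d.setdefault name p.1) d) d).get? s
      = (d.get? s).or (aFindZone s zones) := by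
  induction zones generalizing d with
  | nil => cases h : d.get? s <;> simp [aFindZone, h]
  | cons p rest ih =>
    obtain ⟨z, a⟩ := p
    simp only [List.foldl_cons, ih, get?_setdefault_fold, aFindZone]
    by_cases ha : s ∈ a
    · cases h : d.get? s <;> simp [ha]
    · cases h : d.get? s <;> simp [ha]

theorem get?_bZoneOf (zones : List (String × List String)) (s : String) :
    (bZoneOf zones).get? s = aFindZone s zones := by
  rw [bZoneOf, get?_bZoneOf_fold]
  simp [PySem.Dict.get?_empty]

theorem bSoft_eq_softA (zones : List (String × List String)) :
    bSoft (bZoneOf zones) = softA zones := by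
  funext s
  rw [bSoft, softA, get?_bZoneOf]

theorem aStep_eq (zones : List (String × List String)) (acc : List String) (last : Bool) (s : String) :
    aStep zones (acc, last) s
      = (acc ++ (if softA zones s && last then [] else [s]), softA zones s) := by
  by_cases hc : PySem.Str.startswith s "[Clothing Change]" = true
  · have hsoft : softA zones s = false := by simp only [softA, hc, Bool.not_true, Bool.false_and]
    simp at hc
    simp [aStep, hc, hsoft]
  · have hcf : PySem.Str.startswith s "[Clothing Change]" = false := by simpa using hc
    have hsoft : softA zones s
        = (aFindZone s zones == some "food" || aFindZone s zones == some "relaxation") := by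
      simp only [softA, hcf, Bool.not_false, Bool.true_and]
    simp at hcf
    by_cases hs : (aFindZone s zones == some "food" || aFindZone s zones == some "relaxation") = true
    · by_cases hl : last = true
      · simp [aStep, hcf, hsoft, hs, hl]
      · have hlf : last = false := by simpa using hl
        simp [aStep, hcf, hsoft, hs, hlf]
    · have hsf : (aFindZone s zones == some "food" || aFindZone s zones == some "relaxation") = false := by
        simpa using hs
      simp [aStep, hcf, hsoft, hsf]

theorem foldA_eq_keepRuns (zones : List (String × List String)) (route : List String)
    (acc : List String) (last : Bool) :
    (route.foldl (aStep zones) (acc, last)).1 = acc ++ keepRuns (softA zones) last route := by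
  induction route generalizing acc last with
  | nil => simp [keepRuns]
  | cons s rest ih =>
    simp only [List.foldl_cons, aStep_eq, keepRuns, ih, List.append_assoc]

-- keepRuns skips (c = true) or keeps (c = false) a whole run of flag c
theorem keepRuns_run (f : String → Bool) (c : Bool) (run rest : List String)
    (h : ∀ t ∈ run, f t = c) :
    keepRuns f c (run ++ rest) = (if c then [] else run) ++ keepRuns f c rest := by
  induction run with
  | nil => simp
  | cons t tl ih =>
    have ht : f t = c := h t (List.mem_cons_self ..)
    have htl : ∀ x ∈ tl, f x = c := fun x hx => h x (List.mem_cons_of_mem _ hx)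
    simp only [List.cons_append, keepRuns, ht, ih htl]
    cases c <;> simp

-- the prev flag is irrelevant when the head's flag differs from it (or the list is empty)
theorem keepRuns_head_ne (f : String → Bool) (b b' : Bool) (l : List String)
    (h : ∀ s, l.head? = some s → (f s && b) = false ∧ (f s && b') = false) :
    keepRuns f b l = keepRuns f b' l := by
  cases l with
  | nil => rfl
  | cons s rest =>
    obtain ⟨h1, h2⟩ := h s rfl
    simp only [keepRuns, h1, h2]

theorem bLoop_eq_keepRuns (f : String → Bool) (l : List String) :
    bLoop f l = keepRuns f false l := by
  induction hn : l.length using Nat.strong_induction_on generalizing l with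
  | _ n ih =>
    cases l with
    | nil => rw [bLoop]; rfl
    | cons s rest =>
      subst hn
      have hsplit : rest.takeWhile (fun t => f t == f s) ++ rest.dropWhile (fun t => f t == f s) = rest :=
        List.takeWhile_append_dropWhile
      have hrun : ∀ t ∈ rest.takeWhile (fun t => f t == f s), f t = f s := by
        intro t ht
        simpa using List.mem_takeWhile_imp ht
      have hdrop : ∀ x, (rest.dropWhile (fun t => f t == f s)).head? = some x →
          (f x && f s) = false ∧ (f x && false) = false := by
        intro x hx
        have := List.head?_dropWhile_not (p := fun t => f t == f s) (l := rest)
        rw [hx] at this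
        have hne : (f x == f s) = false := by
          cases h : (f x == f s) <;> simp [h] at this ⊢
        constructor
        · cases hfs : f s
          · simp
          · cases hfx : f x
            · simp
            · rw [hfs, hfx] at hne; simp at hne
        · simp
      have hlen : (rest.dropWhile (fun t => f t == f s)).length < (s :: rest).length :=
        Nat.lt_succ_of_le (List.length_dropWhile_le _ _)
      calc bLoop f (s :: rest)
          = (if f s then [s] else s :: rest.takeWhile (fun t => f t == f s))
              ++ bLoop f (rest.dropWhile (fun t => f t == f s)) := by
            rw [bLoop]
        _ = (if f s then [s] else s :: rest.takeWhile (fun t => f t == f s))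
              ++ keepRuns f false (rest.dropWhile (fun t => f t == f s)) := by
            rw [ih _ hlen _ rfl]
        _ = keepRuns f false (s :: rest) := by
            conv_rhs => rw [show (s :: rest) = s :: (rest.takeWhile (fun t => f t == f s) ++ rest.dropWhile (fun t => f t == f s)) from by rw [hsplit]]
            simp only [keepRuns, Bool.and_false]
            rw [keepRuns_run f (f s) _ _ hrun,
                keepRuns_head_ne f (f s) false _ (by intro x hx; exact hdrop x hx)]
            cases h : f s <;> simp

-- ===== VERDICT (by name: the statement is the Claim_ definition above) =====
theorem no_consecutive_food_or_break_spec : Claim_equal_no_consecutive_food_or_break := by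
  intro route zones _
  show no_consecutive_food_or_break route zones = no_consecutive_food_or_break_alt route zones
  rw [no_consecutive_food_or_break, no_consecutive_food_or_break_alt,
      foldA_eq_keepRuns, bSoft_eq_softA, bLoop_eq_keepRuns]
  simp
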